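-- pv_equiv track=rewrite | github.com/stasptkk-cpu/free_knots | functions.py | mod_2_non_reducing_with_chords
-- ===== SOURCE A (Python) =====
-- def mod_2_non_reducing_with_chords(diagram):
--     """
--     Применяет второе неуменьшающее движение Рейдемейстера (Ω2n) с сохранением информации о хордах.
--
--     Параметры:
--     ----------
--     diagram : list of int
--         Исходная хордовая диаграмма
--
--     Возвращает:
--     -----------
--     list of tuple
--         Список кортежей (модифицированная_диаграмма, участвующие_хорды)
--     """
--     results = [(diagram.copy(), None)]
--
--     for i in range(len(diagram) - 2):
--         chord_a = diagram[i]
--         chord_b = diagram[i - 1]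
--
--         if i == 0:
--             for j in range(i + 2, len(diagram) - 1):
--                 chord_c = diagram[j]
--                 chord_d = diagram[j - 1]
--
--                 if (chord_c == chord_a and chord_d == chord_b) or \
--                    (chord_c == chord_b and chord_d == chord_a):
--
--                     modified_diagram = diagram.copy()
--                     modified_diagram[i] = chord_b
--                     modified_diagram[i - 1] = chord_a
--
--                     involved_chords = sorted([chord_a, chord_b])
--                     results.append((modified_diagram, involved_chords))
--         else:
--             for j in range(i + 2, len(diagram)):
--                 chord_c = diagram[j]
--                 chord_d = diagram[j - 1]
--
--                 if (chord_c == chord_a and chord_d == chord_b) or \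
--                    (chord_c == chord_b and chord_d == chord_a):
--
--                     modified_diagram = diagram.copy()
--                     modified_diagram[i] = chord_b
--                     modified_diagram[i - 1] = chord_a
--
--                     involved_chords = sorted([chord_a, chord_b])
--                     results.append((modified_diagram, involved_chords))
--
--     return results
-- ===== SOURCE B (Python) =====
-- def mod_2_non_reducing_with_chords(diagram):
--     """
--     Second non-reducing Reidemeister move (Omega-2n) with chord information.
--
--     The diagram is cyclic: the chord pair at position i is
--     {diagram[i-1], diagram[i]} (at i == 0 this wraps to the last entry).
--     Instead of rescanning the whole diagram for each i, we index all
--     adjacent pairs once (pair -> ascending list of positions) and count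
--     each i's matches inside its bucket only.
--     """
--     n = len(diagram)
--     results = [(diagram.copy(), None)]
--
--     def pair(i):
--         x, y = diagram[i - 1], diagram[i]
--         return (x, y) if x <= y else (y, x)
--
--     positions = {}
--     for j in range(n):
--         positions.setdefault(pair(j), []).append(j)
--
--     for i in range(n - 2):
--         # the wrap pair at i == 0 overlaps the last pair, so stop one short there
--         hi = n - 1 if i == 0 else n
--         c = sum(1 for j in positions.get(pair(i), []) if i + 2 <= j < hi)
--         if c:
--             a, b = diagram[i], diagram[i - 1]
--             mod = diagram.copy()
--             mod[i], mod[i - 1] = b, a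
--             results.extend([(mod, sorted((a, b)))] * c)
--     return results
-- ===== Notes on version B (the rewrite author's own statement) =====
-- stated objective: alternative
-- what changed: Replaces A's nested scan (for each i, rescan the whole diagram comparing element pairs, appending once per match) by building a dict index from each adjacent chord pair to its ascending position list once, then counting each i's matches inside its own bucket and emitting the move with its multiplicity (duplicate result tuples are value-equal but share list objects).
import Mathlib
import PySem

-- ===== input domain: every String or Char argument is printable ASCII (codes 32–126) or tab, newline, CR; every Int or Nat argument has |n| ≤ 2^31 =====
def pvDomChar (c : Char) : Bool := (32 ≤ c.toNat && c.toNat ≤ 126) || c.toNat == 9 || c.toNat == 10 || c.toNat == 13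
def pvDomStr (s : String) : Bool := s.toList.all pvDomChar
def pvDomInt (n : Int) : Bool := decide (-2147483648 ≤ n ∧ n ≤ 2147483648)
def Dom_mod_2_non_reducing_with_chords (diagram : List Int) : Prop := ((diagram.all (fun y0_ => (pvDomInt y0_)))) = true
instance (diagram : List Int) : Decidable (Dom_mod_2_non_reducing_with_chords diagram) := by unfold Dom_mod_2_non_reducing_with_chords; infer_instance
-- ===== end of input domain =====

-- B replaces A's nested rescans by one dict index from each (cyclically) adjacent chord pair to
-- its ascending position list, then counts each i's matches inside its own bucket (objective:
-- alternative; duplicate result tuples share list objects — same value, built without re-copying).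

-- ===== PORT A =====
def mod_2_non_reducing_with_chords (diagram : List Int) : List (List Int × Option (List Int)) :=
  let n : Int := PySem.List.len diagram
  (PySem.List.pyRange 0 (n - 2) 1).foldl (fun results i =>
    let chord_a := PySem.List.pyGetD diagram i 0
    let chord_b := PySem.List.pyGetD diagram (i - 1) 0
    if i = 0 then
      (PySem.List.pyRange (i + 2) (n - 1) 1).foldl (fun results j =>
        let chord_c := PySem.List.pyGetD diagram j 0
        let chord_d := PySem.List.pyGetD diagram (j - 1) 0
        if (chord_c = chord_a ∧ chord_d = chord_b) ∨ (chord_c = chord_b ∧ chord_d = chord_a) then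
          let modified_diagram := PySem.List.pySetD (PySem.List.pySetD diagram i chord_b) (i - 1) chord_a
          let involved_chords := PySem.List.sorted [chord_a, chord_b] (fun x => x) false
          results ++ [(modified_diagram, some involved_chords)]
        else results) results
    else
      (PySem.List.pyRange (i + 2) n 1).foldl (fun results j =>
        let chord_c := PySem.List.pyGetD diagram j 0
        let chord_d := PySem.List.pyGetD diagram (j - 1) 0
        if (chord_c = chord_a ∧ chord_d = chord_b) ∨ (chord_c = chord_b ∧ chord_d = chord_a) then
          let modified_diagram := PySem.List.pySetD (PySem.List.pySetD diagram i chord_b) (i - 1) chord_a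
          let involved_chords := PySem.List.sorted [chord_a, chord_b] (fun x => x) false
          results ++ [(modified_diagram, some involved_chords)]
        else results) results)
    [(diagram, none)]

-- ===== PORT B =====
-- Source B's local helper 'pair' (the unordered adjacent pair as a sorted tuple)
def pvKey (x y : Int) : Int × Int := if x ≤ y then (x, y) else (y, x)

def mod_2_non_reducing_with_chords_alt (diagram : List Int) : List (List Int × Option (List Int)) :=
  let n : Int := PySem.List.len diagram
  let results : List (List Int × Option (List Int)) := [(diagram, none)]
  let positions : PySem.Dict (Int × Int) (List Int) :=
    (PySem.List.pyRange 0 n 1).foldl (fun dct j =>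
      let kk := pvKey (PySem.List.pyGetD diagram (j - 1) 0) (PySem.List.pyGetD diagram j 0)
      dct.insert kk (dct.getD kk [] ++ [j])) PySem.Dict.empty
  (PySem.List.pyRange 0 (n - 2) 1).foldl (fun results i =>
    let hi := if i = 0 then n - 1 else n
    let c := (positions.getD (pvKey (PySem.List.pyGetD diagram (i - 1) 0) (PySem.List.pyGetD diagram i 0)) []).foldl
        (fun acc j => if i + 2 ≤ j ∧ j < hi then acc + 1 else acc) (0 : Int)
    if c ≠ 0 then
      let a := PySem.List.pyGetD diagram i 0
      let b := PySem.List.pyGetD diagram (i - 1) 0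
      let md := PySem.List.pySetD (PySem.List.pySetD diagram i b) (i - 1) a
      results ++ PySem.List.pyRepeat [(md, some (PySem.List.sorted [a, b] (fun x => x) false))] c
    else results) results

-- ===== PRECONDITION & SPEC =====
def Spec_mod_2_non_reducing_with_chords (diagram : List Int) (out : List (List Int × Option (List Int))) : Prop := out = mod_2_non_reducing_with_chords_alt diagram
instance (diagram : List Int) (out : List (List Int × Option (List Int))) : Decidable (Spec_mod_2_non_reducing_with_chords diagram out) := by unfold Spec_mod_2_non_reducing_with_chords; infer_instance

-- ===== CLAIM (what is proved, stated in full; the proofs are below) =====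
def Claim_equal_mod_2_non_reducing_with_chords : Prop := ∀ (diagram : List Int), Dom_mod_2_non_reducing_with_chords diagram → Spec_mod_2_non_reducing_with_chords diagram (mod_2_non_reducing_with_chords diagram)

-- ===== LEMMAS AND PROOFS =====

-- key of the adjacent pair ending at position j (j = 0 wraps, as diagram[-1] does)
def pvKp (d : List Int) (j : Int) : Int × Int :=
  pvKey (PySem.List.pyGetD d (j - 1) 0) (PySem.List.pyGetD d j 0)
-- the result tuple emitted for position i
def pvItem (d : List Int) (i : Int) : List Int × Option (List Int) :=
  (PySem.List.pySetD (PySem.List.pySetD d i (PySem.List.pyGetD d (i - 1) 0)) (i - 1) (PySem.List.pyGetD d i 0),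
   some (PySem.List.sorted [PySem.List.pyGetD d i 0, PySem.List.pyGetD d (i - 1) 0] (fun x => x) false))
-- upper end of the scan window at position i
def pvHi (d : List Int) (i : Int) : Int :=
  if i = 0 then PySem.List.len d - 1 else PySem.List.len d
-- number of matches for position i
def pvCnt (d : List Int) (i : Int) : Nat :=
  ((PySem.List.pyRange (i + 2) (pvHi d i) 1).map (pvKp d)).count (pvKp d i)

theorem pvKey_eq_iff (a b c e : Int) :
    pvKey c e = pvKey a b ↔ ((c = a ∧ e = b) ∨ (c = b ∧ e = a)) := by
  unfold pvKey; split_ifs <;> simp [Prod.ext_iff] <;> omega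

theorem pvFoldl_ite_append_const {α : Type} (l : List Int) (P : Int → Prop) [DecidablePred P]
    (t : α) (r : List α) :
    l.foldl (fun acc j => if P j then acc ++ [t] else acc) r
      = r ++ List.replicate (l.countP (fun j => decide (P j))) t := by
  rw [PySem.List.foldl_append_ite (p := P) (f := fun _ => t)]
  simp [List.map_const', List.countP_eq_length_filter]

theorem pvCountP_eq (d : List Int) (i : Int) (lo hi : Int) :
    (PySem.List.pyRange lo hi 1).countP
        (fun j => decide ((PySem.List.pyGetD d j 0 = PySem.List.pyGetD d i 0 ∧
                           PySem.List.pyGetD d (j - 1) 0 = PySem.List.pyGetD d (i - 1) 0) ∨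
                          (PySem.List.pyGetD d j 0 = PySem.List.pyGetD d (i - 1) 0 ∧
                           PySem.List.pyGetD d (j - 1) 0 = PySem.List.pyGetD d i 0)))
      = ((PySem.List.pyRange lo hi 1).map (pvKp d)).count (pvKp d i) := by
  rw [List.count_eq_countP, List.countP_map]
  apply List.countP_congr
  intro j _
  simp only [Function.comp, pvKp, beq_iff_eq]
  rw [show pvKey (PySem.List.pyGetD d (j - 1) 0) (PySem.List.pyGetD d j 0)
        = pvKey (PySem.List.pyGetD d j 0) (PySem.List.pyGetD d (j - 1) 0) by
        unfold pvKey; split_ifs <;> simp [Prod.ext_iff] <;> omega,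
      show pvKey (PySem.List.pyGetD d (i - 1) 0) (PySem.List.pyGetD d i 0)
        = pvKey (PySem.List.pyGetD d i 0) (PySem.List.pyGetD d (i - 1) 0) by
        unfold pvKey; split_ifs <;> simp [Prod.ext_iff] <;> omega]
  simp [pvKey_eq_iff]

theorem pvA_eq (d : List Int) :
    mod_2_non_reducing_with_chords d
      = (d, none) :: (PySem.List.pyRange 0 (PySem.List.len d - 2) 1).flatMap
          (fun i => List.replicate (pvCnt d i) (pvItem d i)) := by
  unfold mod_2_non_reducing_with_chords
  simp only []
  rw [PySem.List.foldl_congr_mem'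
      (g := fun r i => r ++ List.replicate (pvCnt d i) (pvItem d i))]
  · rw [PySem.List.foldl_append_eq_flatMap]
    simp
  · intro i _ r
    by_cases h0 : i = 0
    · subst h0
      rw [if_pos rfl]
      rw [pvFoldl_ite_append_const, pvCountP_eq d 0]
      have : pvHi d 0 = PySem.List.len d - 1 := by simp [pvHi]
      simp [pvCnt, pvItem, this]
    · simp only [if_neg h0]
      rw [pvFoldl_ite_append_const, pvCountP_eq d i]
      have : pvHi d i = PySem.List.len d := by simp [pvHi, h0]
      simp [pvCnt, pvItem, this]

-- the position index: bucket of key k = the positions with that pair key, in ascending order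
theorem pvPositions_getD (d : List Int) (l : List Int)
    (D : PySem.Dict (Int × Int) (List Int)) (k : Int × Int) :
    (l.foldl (fun dct j =>
        dct.insert (pvKey (PySem.List.pyGetD d (j - 1) 0) (PySem.List.pyGetD d j 0))
          (dct.getD (pvKey (PySem.List.pyGetD d (j - 1) 0) (PySem.List.pyGetD d j 0)) [] ++ [j])) D).getD k []
      = D.getD k [] ++ l.filter (fun j => decide (pvKp d j = k)) := by
  induction l generalizing D with
  | nil => simp
  | cons j t ih =>
    simp only [List.foldl_cons, List.filter_cons,
      show pvKey (PySem.List.pyGetD d (j - 1) 0) (PySem.List.pyGetD d j 0) = pvKp d j from rfl]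
    rw [ih, PySem.Dict.getD_insert]
    by_cases h : k = pvKp d j
    · subst h
      simp
    · rw [if_neg h]
      simp [show pvKp d j ≠ k from fun hh => h hh.symm]

theorem pvCount_map (d : List Int) (k : Int × Int) (l : List Int) :
    l.countP (fun j => decide (pvKp d j = k)) = (l.map (pvKp d)).count k := by
  rw [List.count_eq_countP, List.countP_map]
  apply List.countP_congr
  intro j _
  simp [Function.comp]

-- counting a bucket inside the window equals counting the window's pair keys
theorem pvCount_eq (d : List Int) (i : Int) (h0 : 0 ≤ i) (h2 : i < PySem.List.len d - 2) :
    ((PySem.List.pyRange 0 (PySem.List.len d) 1).filter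
        (fun j => decide (pvKp d j = pvKp d i))).foldl
      (fun acc j => if i + 2 ≤ j ∧ j < (if i = 0 then PySem.List.len d - 1 else PySem.List.len d)
                    then acc + 1 else acc) (0 : Int)
    = (pvCnt d i : Int) := by
  rw [PySem.List.foldl_ite_add_one, List.countP_filter]
  have hhi : (if i = 0 then PySem.List.len d - 1 else PySem.List.len d) = pvHi d i := by
    simp [pvHi]
  rw [hhi]
  have hsplit : PySem.List.pyRange 0 (PySem.List.len d) 1
      = (PySem.List.pyRange 0 (i + 2) 1 ++ PySem.List.pyRange (i + 2) (pvHi d i) 1)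
        ++ PySem.List.pyRange (pvHi d i) (PySem.List.len d) 1 := by
    rw [PySem.List.pyRange_one_append 0 (i + 2) (PySem.List.len d) (by omega)
          (by omega),
        PySem.List.pyRange_one_append (i + 2) (pvHi d i) (PySem.List.len d)
          (by unfold pvHi; split_ifs <;> omega) (by unfold pvHi; split_ifs <;> omega),
        List.append_assoc]
  rw [hsplit, List.countP_append, List.countP_append]
  have hz1 : (PySem.List.pyRange 0 (i + 2) 1).countP
      (fun j => decide (i + 2 ≤ j ∧ j < pvHi d i) && decide (pvKp d j = pvKp d i)) = 0 := by
    rw [List.countP_eq_zero]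
    intro j hj
    rw [PySem.List.mem_pyRange_one] at hj
    simp only [Bool.and_eq_true, decide_eq_true_eq, not_and]
    intro hb _
    omega
  have hz2 : (PySem.List.pyRange (pvHi d i) (PySem.List.len d) 1).countP
      (fun j => decide (i + 2 ≤ j ∧ j < pvHi d i) && decide (pvKp d j = pvKp d i)) = 0 := by
    rw [List.countP_eq_zero]
    intro j hj
    rw [PySem.List.mem_pyRange_one] at hj
    simp only [Bool.and_eq_true, decide_eq_true_eq, not_and]
    intro hb _
    omega
  have hmid : (PySem.List.pyRange (i + 2) (pvHi d i) 1).countP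
      (fun j => decide (i + 2 ≤ j ∧ j < pvHi d i) && decide (pvKp d j = pvKp d i))
      = (PySem.List.pyRange (i + 2) (pvHi d i) 1).countP (fun j => decide (pvKp d j = pvKp d i)) := by
    apply List.countP_congr
    intro j hj
    rw [PySem.List.mem_pyRange_one] at hj
    simp only [Bool.and_eq_true, decide_eq_true_eq]
    constructor
    · rintro ⟨_, hk⟩; exact hk
    · intro hk; exact ⟨⟨hj.1, hj.2⟩, hk⟩
  rw [hz1, hz2, hmid, pvCount_map]
  simp [pvCnt]

theorem pvB_eq (d : List Int) :
    mod_2_non_reducing_with_chords_alt d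
      = (d, none) :: (PySem.List.pyRange 0 (PySem.List.len d - 2) 1).flatMap
          (fun i => List.replicate (pvCnt d i) (pvItem d i)) := by
  unfold mod_2_non_reducing_with_chords_alt
  simp only []
  rw [PySem.List.foldl_congr_mem'
      (g := fun r i => r ++ List.replicate (pvCnt d i) (pvItem d i))]
  · rw [PySem.List.foldl_append_eq_flatMap]
    simp
  · intro i hi r
    obtain ⟨h0, h2⟩ := (PySem.List.mem_pyRange_one).mp hi
    have hpos := pvPositions_getD d (PySem.List.pyRange 0 (PySem.List.len d) 1)
      PySem.Dict.empty (pvKp d i)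
    rw [show (PySem.Dict.empty : PySem.Dict (Int × Int) (List Int)).getD (pvKp d i) [] = [] from rfl,
        List.nil_append] at hpos
    rw [show pvKey (PySem.List.pyGetD d (i - 1) 0) (PySem.List.pyGetD d i 0) = pvKp d i from rfl,
        hpos, pvCount_eq d i h0 h2]
    by_cases hc : (pvCnt d i : Int) ≠ 0
    · rw [if_pos hc, PySem.List.pyRepeat_singleton, Int.toNat_natCast]
      rfl
    · rw [if_neg hc]
      have : pvCnt d i = 0 := by omega
      rw [this, List.replicate_zero, List.append_nil]

-- ===== VERDICT (by name: the statement is the Claim_ definition above) =====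
theorem mod_2_non_reducing_with_chords_spec : Claim_equal_mod_2_non_reducing_with_chords := by
  intro d _
  unfold Spec_mod_2_non_reducing_with_chords
  rw [pvA_eq d, pvB_eq d]
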